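-- pv_equiv track=rewrite | github.com/sakai-tomohiko124/gameserver | functions/rooms.py | _straight_top_idx
-- ===== SOURCE A (Python) =====
-- from typing import Dict, Any, List
--
-- def _rank_value(card: str) -> int:
--
--     if card == 'JOKER':
--
--         return 999
--     rank = card[:-1]
--     order = ['3','4','5','6','7','8','9','10','J','Q','K','A','2']
--     try:
--         return order.index(rank)
--     except ValueError:
--         return -1
--
-- def _is_straight(cards: List[str]) -> bool:
--
--     if len(cards) < 3:
--         return False
--
--     n = len(cards)
--
--     nonjoker = [c for c in cards if c != 'JOKER']
--
--     if nonjoker: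
--         suits = [c[-1] for c in nonjoker]
--         if len(set(suits)) != 1:
--             return False
--
--     nonjoker_idxs = sorted([_rank_value(c) for c in nonjoker])
--
--     if len(set(nonjoker_idxs)) != len(nonjoker_idxs):
--         return False
--     jokers = len([c for c in cards if c == 'JOKER'])
--
--     max_rank = 12
--     for start in range(0, max_rank - n + 2):
--         end = start + n - 1
--         ok = True
--         for idx in nonjoker_idxs:
--             if idx < start or idx > end:
--                 ok = False
--                 break
--         if ok:
--             return True
--     return False
--
-- def _straight_top_idx(cards: List[str]) -> int:
--     """If cards can form a straight (with jokers), return the maximum possible top index.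
--     Returns -1 if not possible.
--     """
--     n = len(cards)
--     nonjoker = [c for c in cards if c != 'JOKER']
--     if not _is_straight(cards):
--         return -1
--
--     if not nonjoker:
--         return 12
--     nonjoker_idxs = sorted([_rank_value(c) for c in nonjoker])
--     max_rank = 12
--     best_top = -1
--     for start in range(0, max_rank - n + 2):
--         end = start + n - 1
--         ok = True
--         for idx in nonjoker_idxs:
--             if idx < start or idx > end:
--                 ok = False
--                 break
--         if ok:
--             best_top = max(best_top, end)
--     return best_top
-- ===== SOURCE B (Python) =====
-- from typing import List
--
-- def _rank_value(card: str) -> int: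
--     if card == 'JOKER':
--         return 999
--     rank = card[:-1]
--     order = ['3','4','5','6','7','8','9','10','J','Q','K','A','2']
--     try:
--         return order.index(rank)
--     except ValueError:
--         return -1
--
-- def _straight_top_idx(cards: List[str]) -> int:
--     """If cards can form a straight (with jokers), return the maximum possible top index.
--     Returns -1 if not possible.
--     """
--     n = len(cards)
--     if n < 3 or n > 13:
--         return -1
--     nonjoker = [c for c in cards if c != 'JOKER']
--     if not nonjoker:
--         return 12
--     if len({c[-1] for c in nonjoker}) != 1:
--         return -1
--     idxs = [_rank_value(c) for c in nonjoker]
--     lo, hi = min(idxs), max(idxs)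
--     if lo < 0 or hi - lo >= n or len(set(idxs)) != len(idxs):
--         return -1
--     return min(lo + n - 1, 12)
-- ===== Notes on version B (the rewrite author's own statement) =====
-- stated objective: simpler
-- what changed: B replaces A's _is_straight guard plus second window-scanning loop over every start position with direct closed-form checks (3<=n<=13, one suit, distinct ranks, min rank >= 0, max-min < n) and the closed-form answer min(min_rank + n - 1, 12); no loop over candidate windows remains.
import Mathlib
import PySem

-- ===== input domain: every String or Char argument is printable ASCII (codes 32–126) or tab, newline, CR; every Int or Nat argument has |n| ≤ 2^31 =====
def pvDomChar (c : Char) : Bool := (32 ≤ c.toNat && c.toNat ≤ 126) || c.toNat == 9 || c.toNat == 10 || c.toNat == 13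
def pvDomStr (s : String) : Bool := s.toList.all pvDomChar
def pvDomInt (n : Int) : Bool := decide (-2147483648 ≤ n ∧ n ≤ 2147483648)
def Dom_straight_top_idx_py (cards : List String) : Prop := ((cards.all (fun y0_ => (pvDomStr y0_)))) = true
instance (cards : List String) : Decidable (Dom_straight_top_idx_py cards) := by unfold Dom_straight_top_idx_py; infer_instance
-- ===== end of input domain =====

-- ===== PORT A =====
-- B hardens nothing and fixes nothing here: one honest line — B computes the same top index by
-- closed-form bounds on the rank indices instead of A's scan over every candidate window (objective: simpler).

-- shared helper: both Pythons define the identical `_rank_value`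
def rank_value (card : String) : Int :=
  if card = "JOKER" then 999
  else
    let rank := PySem.Str.slice card none (some (-1))
    let order : List String := ["3","4","5","6","7","8","9","10","J","Q","K","A","2"]
    match PySem.List.index? order rank with
    | some i => (i : Int)
    | none => -1

-- `c[-1]` raises IndexError on the empty string; Pre_ excludes those inputs, the `.getD ' '` default is never read inside Pre_
def is_straight (cards : List String) : Bool :=
  if cards.length < 3 then false
  else
    let n : Int := (cards.length : Int)
    let nonjoker := cards.filter (fun c => c != "JOKER")
    let suitsOk :=
      if nonjoker = [] then true
      else
        let suits := nonjoker.map (fun c => (PySem.Str.pyGet? c (-1)).getD ' ')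
        (PySem.Set.ofList suits).length == 1
    if !suitsOk then false
    else
      let nonjoker_idxs := PySem.List.sorted (nonjoker.map rank_value) (fun x => x) false
      if (PySem.Set.ofList nonjoker_idxs).length != nonjoker_idxs.length then false
      else
        (PySem.List.pyRange 0 (12 - n + 2) 1).any (fun start =>
          nonjoker_idxs.all (fun idx => !(decide (idx < start) || decide (idx > start + n - 1))))

def straight_top_idx_py (cards : List String) : Int :=
  let n : Int := (cards.length : Int)
  let nonjoker := cards.filter (fun c => c != "JOKER")
  if !(is_straight cards) then -1
  else if nonjoker = [] then 12
  else
    let nonjoker_idxs := PySem.List.sorted (nonjoker.map rank_value) (fun x => x) false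
    (PySem.List.pyRange 0 (12 - n + 2) 1).foldl (fun best_top start =>
      if nonjoker_idxs.all (fun idx => !(decide (idx < start) || decide (idx > start + n - 1)))
      then max best_top (start + n - 1) else best_top) (-1)

-- ===== PORT B =====
def straight_top_idx_py_alt (cards : List String) : Int :=
  let n : Int := (cards.length : Int)
  if n < 3 ∨ 13 < n then -1
  else
    let nonjoker := cards.filter (fun c => c != "JOKER")
    if nonjoker = [] then 12
    else
      let suits := PySem.Set.ofList (nonjoker.map (fun c => (PySem.Str.pyGet? c (-1)).getD ' '))
      if suits.length ≠ 1 then -1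
      else
        let idxs := nonjoker.map rank_value
        let lo := (PySem.List.min? idxs (fun x => x)).getD 0
        let hi := (PySem.List.max? idxs (fun x => x)).getD 0
        if lo < 0 ∨ n ≤ hi - lo ∨ (PySem.Set.ofList idxs).length ≠ idxs.length then -1
        else min (lo + n - 1) 12

-- ===== PRECONDITION & SPEC =====
-- Pre_ excludes exactly the inputs where the Python A raises IndexError: a list of at least 3 cards
-- containing the empty string ("" is not 'JOKER', so `c[-1]` over the non-joker suits raises).
def Pre_straight_top_idx_py (cards : List String) : Prop := 3 ≤ cards.length → "" ∉ cards
instance (cards : List String) : Decidable (Pre_straight_top_idx_py cards) := by unfold Pre_straight_top_idx_py; infer_instance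
def pvWitness_straight_top_idx_py : List String := ["3s", "4s", "JOKER"]

def Spec_straight_top_idx_py (cards : List String) (out : Int) : Prop := out = straight_top_idx_py_alt cards
instance (cards : List String) (out : Int) : Decidable (Spec_straight_top_idx_py cards out) := by unfold Spec_straight_top_idx_py; infer_instance

-- ===== CLAIM (what is proved, stated in full; the proofs are below) =====
def Claim_equal_straight_top_idx_py : Prop := ∀ (cards : List String), Dom_straight_top_idx_py cards → Pre_straight_top_idx_py cards → Spec_straight_top_idx_py cards (straight_top_idx_py cards)



-- ===== LEMMAS AND PROOFS =====

-- deduplicated size is invariant under sorting (A dedup-checks the sorted ranks, B the unsorted ones)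
lemma setLen_sorted (l : List Int) :
    (PySem.Set.ofList (PySem.List.sorted l (fun x => x) false)).length = (PySem.Set.ofList l).length := by
  apply List.Perm.length_eq
  rw [List.perm_ext_iff_of_nodup (PySem.Set.nodup_ofList _) (PySem.Set.nodup_ofList _)]
  intro a
  simp [PySem.Set.mem_ofList, PySem.List.mem_sorted]

-- every non-JOKER card has rank index in [-1, 12]
lemma rank_value_bounds (c : String) (h : c ≠ "JOKER") :
    -1 ≤ rank_value c ∧ rank_value c ≤ 12 := by
  unfold rank_value
  rw [if_neg h]
  rcases h2 : PySem.List.index? ["3","4","5","6","7","8","9","10","J","Q","K","A","2"]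
      (PySem.Str.slice c none (some (-1))) with _ | i
  · simp only [h2]
    omega
  · obtain ⟨pre, suf, heq, hlen, -⟩ := (PySem.List.index?_eq_some_iff _ _ _).mp h2
    have hl : (13:Nat) = pre.length + (suf.length + 1) := by
      simpa using congrArg List.length heq
    simp only [h2]
    omega

-- the inner `for idx in nonjoker_idxs` loop checks exactly "start ≤ min ∧ max ≤ end"
lemma all_window (L : List Int) (lo hi s e : Int)
    (hlo : lo ∈ L) (hhi : hi ∈ L) (h : ∀ x ∈ L, lo ≤ x ∧ x ≤ hi) :
    (L.all fun idx => !(decide (idx < s) || decide (idx > e))) = (decide (s ≤ lo) && decide (hi ≤ e)) := by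
  rw [Bool.eq_iff_iff]
  simp only [List.all_eq_true, Bool.not_eq_true', Bool.or_eq_false_iff,
    decide_eq_false_iff_not, not_lt, Bool.and_eq_true, decide_eq_true_eq]
  constructor
  · exact fun H => ⟨(H lo hlo).1, (H hi hhi).2⟩
  · rintro ⟨h1, h2⟩ x hx
    have := h x hx
    exact ⟨by omega, by omega⟩

-- closed form of A's best_top fold
lemma fold_max_window (N lo hi : Int) (hN : 1 ≤ N) (k : Nat) :
    ((PySem.List.pyRange 0 (k : Int) 1).foldl (fun b s =>
        if (decide (s ≤ lo) && decide (hi ≤ s + N - 1)) = true then max b (s + N - 1) else b) (-1))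
      = if 0 ≤ min lo ((k : Int) - 1) ∧ hi ≤ min lo ((k : Int) - 1) + N - 1
        then min lo ((k : Int) - 1) + N - 1 else -1 := by
  induction k with
  | zero =>
    rw [show ((0:Nat):Int) = 0 from rfl, show PySem.List.pyRange 0 0 1 = [] from by decide]
    rw [List.foldl_nil, if_neg (by omega)]
  | succ k ih =>
    have h0 : (0:Int) ≤ (k:Int) := by exact_mod_cast Nat.zero_le k
    have hc : ((k+1 : Nat) : Int) = (k : Int) + 1 := by push_cast; ring
    rw [hc, PySem.List.pyRange_one_succ_right h0, List.foldl_append, ih]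
    simp only [List.foldl_cons, List.foldl_nil, Bool.and_eq_true, decide_eq_true_eq]
    split_ifs <;> omega

-- ===== VERDICT (by name: the statement is the Claim_ definition above) =====
theorem straight_top_idx_py_spec : Claim_equal_straight_top_idx_py := by
  unfold Claim_equal_straight_top_idx_py
  intro cards _ _
  unfold Spec_straight_top_idx_py
  by_cases h3 : cards.length < 3
  · -- fewer than 3 cards: both return -1
    have hA : is_straight cards = false := by unfold is_straight; rw [if_pos h3]
    have hN3 : ((cards.length : Int)) < 3 := by exact_mod_cast h3
    simp [straight_top_idx_py, straight_top_idx_py_alt, hA, hN3]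
  · by_cases hnj : cards.filter (fun c => c != "JOKER") = []
    · -- all jokers
      have hs0 : PySem.List.sorted ((([]:List String)).map rank_value) (fun x => x) false = [] := rfl
      by_cases h13 : (cards.length : Int) ≤ 13
      · have hA : is_straight cards = true := by
          unfold is_straight
          rw [if_neg h3]
          simp only [hnj, hs0]
          simp
          exact ⟨0, by omega, by omega⟩
        simp only [straight_top_idx_py, straight_top_idx_py_alt, hA, Bool.not_true,
          Bool.false_eq_true, if_false, if_pos hnj]
        rw [if_neg (show ¬((cards.length:Int) < 3 ∨ 13 < (cards.length:Int)) from by omega)]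
      · have hrange : PySem.List.pyRange 0 (12 - (cards.length:Int) + 2) 1 = [] := by
          apply List.eq_nil_iff_forall_not_mem.mpr
          intro x hx
          rw [PySem.List.mem_pyRange_one] at hx
          omega
        have hA : is_straight cards = false := by
          unfold is_straight
          rw [if_neg h3]
          simp [hnj, hrange]
        simp only [straight_top_idx_py, hA, Bool.not_false, if_true, straight_top_idx_py_alt]
        rw [if_pos (Or.inr (show (13:Int) < (cards.length:Int) from by omega))]
    · -- at least one non-joker
      have hc_ne : ∀ c ∈ cards.filter (fun c => c != "JOKER"), c ≠ "JOKER" := by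
        intro c hc
        simpa using (List.mem_filter.mp hc).2
      by_cases hsuits : (PySem.Set.ofList ((cards.filter (fun c => c != "JOKER")).map
          (fun c => (PySem.Str.pyGet? c (-1)).getD ' '))).length = 1
      · -- single suit
        have hsuitsOk : (if cards.filter (fun c => c != "JOKER") = ([]:List String) then true
            else ((PySem.Set.ofList ((cards.filter (fun c => c != "JOKER")).map
              (fun c => (PySem.Str.pyGet? c (-1)).getD ' '))).length == 1)) = true := by
          rw [if_neg hnj]
          simpa using hsuits
        by_cases hdup : (PySem.Set.ofList ((cards.filter (fun c => c != "JOKER")).map rank_value)).length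
            = ((cards.filter (fun c => c != "JOKER")).map rank_value).length
        · -- ranks distinct
          have hdupchk : ((PySem.Set.ofList (PySem.List.sorted ((cards.filter (fun c => c != "JOKER")).map rank_value) (fun x => x) false)).length
              != (PySem.List.sorted ((cards.filter (fun c => c != "JOKER")).map rank_value) (fun x => x) false).length) = false := by
            simp [setLen_sorted, PySem.List.length_sorted, hdup]
          have hmapne : (cards.filter (fun c => c != "JOKER")).map rank_value ≠ [] := by
            simpa [List.map_eq_nil_iff] using hnj
          obtain ⟨lo, hlo⟩ : ∃ lo, PySem.List.min? ((cards.filter (fun c => c != "JOKER")).map rank_value) (fun x => x) = some lo := by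
            rcases h : PySem.List.min? ((cards.filter (fun c => c != "JOKER")).map rank_value) (fun x => x) with _ | v
            · exact absurd ((PySem.List.min?_eq_none_iff _ _).mp h) hmapne
            · exact ⟨v, rfl⟩
          obtain ⟨hi, hhi⟩ : ∃ hi, PySem.List.max? ((cards.filter (fun c => c != "JOKER")).map rank_value) (fun x => x) = some hi := by
            rcases h : PySem.List.max? ((cards.filter (fun c => c != "JOKER")).map rank_value) (fun x => x) with _ | v
            · exact absurd ((PySem.List.max?_eq_none_iff _ _).mp h) hmapne
            · exact ⟨v, rfl⟩
          have hlo_mem := PySem.List.min?_mem hlo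
          have hhi_mem := PySem.List.max?_mem hhi
          have hlo_min : ∀ y ∈ (cards.filter (fun c => c != "JOKER")).map rank_value, lo ≤ y :=
            PySem.List.min?_isMin hlo
          have hhi_max : ∀ y ∈ (cards.filter (fun c => c != "JOKER")).map rank_value, y ≤ hi :=
            PySem.List.max?_isMax hhi
          have hlohi : lo ≤ hi := hlo_min hi hhi_mem
          have hhi12 : hi ≤ 12 := by
            obtain ⟨c, hcnj, hce⟩ := List.mem_map.mp hhi_mem
            have := rank_value_bounds c (hc_ne c hcnj)
            omega
          have hwin : ∀ s : Int,
              ((PySem.List.sorted ((cards.filter (fun c => c != "JOKER")).map rank_value) (fun x => x) false).all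
                (fun idx => !(decide (idx < s) || decide (idx > s + (cards.length:Int) - 1))))
              = (decide (s ≤ lo) && decide (hi ≤ s + (cards.length:Int) - 1)) := by
            intro s
            apply all_window
            · exact (PySem.List.mem_sorted _ _ _ _).mpr hlo_mem
            · exact (PySem.List.mem_sorted _ _ _ _).mpr hhi_mem
            · intro x hx
              have hx' := (PySem.List.mem_sorted _ _ _ _).mp hx
              exact ⟨hlo_min x hx', hhi_max x hx'⟩
          by_cases h13 : 13 < (cards.length : Int)
          · -- more than 13 cards: the start range is empty
            have hrange : PySem.List.pyRange 0 (12 - (cards.length:Int) + 2) 1 = [] := by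
              apply List.eq_nil_iff_forall_not_mem.mpr
              intro x hx
              rw [PySem.List.mem_pyRange_one] at hx
              omega
            have hA : is_straight cards = false := by
              unfold is_straight
              rw [if_neg h3]
              simp only [hsuitsOk, hdupchk, Bool.not_true, Bool.false_eq_true, if_false,
               hrange, List.any_nil]
            simp only [straight_top_idx_py, hA, Bool.not_false, if_true, straight_top_idx_py_alt]
            rw [if_pos (Or.inr h13)]
          · by_cases hcond : 0 ≤ min lo (((14 - cards.length : Nat) : Int) - 1) ∧
                hi ≤ min lo (((14 - cards.length : Nat) : Int) - 1) + (cards.length:Int) - 1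
            · -- a straight: A's best window tops out at min lo (13-n) + n - 1 = min (lo+n-1) 12
              have hany : ((PySem.List.pyRange 0 (12 - (cards.length:Int) + 2) 1).any
                  (fun start => (PySem.List.sorted ((cards.filter (fun c => c != "JOKER")).map rank_value) (fun x => x) false).all
                    (fun idx => !(decide (idx < start) || decide (idx > start + (cards.length:Int) - 1))))) = true := by
                rw [PySem.List.any_congr_mem (fun x _ => hwin x)]
                apply List.any_eq_true.mpr
                refine ⟨min lo (((14 - cards.length : Nat) : Int) - 1), ?_, ?_⟩
                · rw [PySem.List.mem_pyRange_one]
                  omega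
                · simp only [Bool.and_eq_true, decide_eq_true_eq]
                  omega
              have hA : is_straight cards = true := by
                unfold is_straight
                rw [if_neg h3]
                simp only [hsuitsOk, hdupchk, Bool.not_true, Bool.false_eq_true, if_false]
                exact hany
              simp only [straight_top_idx_py, hA, Bool.not_true, Bool.false_eq_true, if_false,
                if_neg hnj, straight_top_idx_py_alt]
              simp only [hwin]
              rw [show (12 - (cards.length:Int) + 2) = ((14 - cards.length : Nat) : Int) from by omega]
              rw [fold_max_window ((cards.length:Int)) lo hi (by omega) (14 - cards.length)]
              rw [if_pos hcond]
              rw [if_neg (show ¬((cards.length:Int) < 3 ∨ 13 < (cards.length:Int)) from by omega)]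
              rw [if_neg (not_not_intro hsuits)]
              simp only [hlo, hhi, Option.getD_some]
              rw [if_neg (show ¬(lo < 0 ∨ (cards.length:Int) ≤ hi - lo ∨
                  (PySem.Set.ofList ((cards.filter (fun c => c != "JOKER")).map rank_value)).length
                    ≠ ((cards.filter (fun c => c != "JOKER")).map rank_value).length) from by
                rintro (h | h | h)
                · omega
                · omega
                · exact h hdup)]
              omega
            · -- no window fits: A finds no straight, B's bound check fails
              have hany : ((PySem.List.pyRange 0 (12 - (cards.length:Int) + 2) 1).any
                  (fun start => (PySem.List.sorted ((cards.filter (fun c => c != "JOKER")).map rank_value) (fun x => x) false).all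
                    (fun idx => !(decide (idx < start) || decide (idx > start + (cards.length:Int) - 1))))) = false := by
                rw [PySem.List.any_congr_mem (fun x _ => hwin x), Bool.eq_false_iff]
                intro hT
                obtain ⟨s, hsmem, hs⟩ := List.any_eq_true.mp hT
                rw [PySem.List.mem_pyRange_one] at hsmem
                simp only [Bool.and_eq_true, decide_eq_true_eq] at hs
                omega
              have hA : is_straight cards = false := by
                unfold is_straight
                rw [if_neg h3]
                simp only [hsuitsOk, hdupchk, Bool.not_true, Bool.false_eq_true, if_false]
                exact hany
              simp only [straight_top_idx_py, hA, Bool.not_false, if_true, straight_top_idx_py_alt,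
                if_neg hnj]
              rw [if_neg (show ¬((cards.length:Int) < 3 ∨ 13 < (cards.length:Int)) from by omega)]
              rw [if_neg (not_not_intro hsuits)]
              simp only [hlo, hhi, Option.getD_some]
              rw [if_pos (show (lo < 0 ∨ (cards.length:Int) ≤ hi - lo ∨
                  (PySem.Set.ofList ((cards.filter (fun c => c != "JOKER")).map rank_value)).length
                    ≠ ((cards.filter (fun c => c != "JOKER")).map rank_value).length) from by omega)]
        · -- duplicate ranks: both -1
          have hdupchk : ((PySem.Set.ofList (PySem.List.sorted ((cards.filter (fun c => c != "JOKER")).map rank_value) (fun x => x) false)).length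
              != (PySem.List.sorted ((cards.filter (fun c => c != "JOKER")).map rank_value) (fun x => x) false).length) = true := by
            simp only [bne_iff_ne, ne_eq, setLen_sorted, PySem.List.length_sorted, List.length_map]
            simp only [List.length_map] at hdup
            intro hEq
            exact hdup hEq
          have hA : is_straight cards = false := by
            unfold is_straight
            rw [if_neg h3]
            simp only [hsuitsOk, hdupchk, Bool.not_true, Bool.false_eq_true, if_false,
             if_true]
          by_cases h13 : (cards.length:Int) < 3 ∨ 13 < (cards.length:Int)
          · simp only [straight_top_idx_py, hA, Bool.not_false, if_true, straight_top_idx_py_alt]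
            rw [if_pos h13]
          · simp only [straight_top_idx_py, hA, Bool.not_false, if_true, straight_top_idx_py_alt,
              if_neg hnj]
            rw [if_neg h13, if_neg (not_not_intro hsuits),
               if_pos (Or.inr (Or.inr hdup))]
      · -- more than one suit: both -1
        have hsuitsOk' : (if cards.filter (fun c => c != "JOKER") = ([]:List String) then true
            else ((PySem.Set.ofList ((cards.filter (fun c => c != "JOKER")).map
              (fun c => (PySem.Str.pyGet? c (-1)).getD ' '))).length == 1)) = false := by
          rw [if_neg hnj]
          simpa using hsuits
        have hA : is_straight cards = false := by
          unfold is_straight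
          rw [if_neg h3]
          simp only [hsuitsOk', Bool.not_false, if_true]
        by_cases h13 : (cards.length:Int) < 3 ∨ 13 < (cards.length:Int)
        · simp only [straight_top_idx_py, hA, Bool.not_false, if_true, straight_top_idx_py_alt]
          rw [if_pos h13]
        · simp only [straight_top_idx_py, hA, Bool.not_false, if_true, straight_top_idx_py_alt,
            if_neg hnj]
          rw [if_neg h13, if_pos hsuits]
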